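-- pv_equiv track=rewrite | github.com/yamunasoftware/WhatFeed | src/processing.py | clean_sentences
-- ===== SOURCE A (Python) =====
-- import string
--
-- punctuation = list(string.punctuation)
--
-- stops = set([
--   'after','the', 'a', 'an', 'i', 'he', 'she', 'they', 'to', 'of', 'it', 'from', 's', 'is', 'in', 'on', 'with', 'for',
--   'how', 'as', 'at', 'be', 'have', 'has', 'had', 'and', 'are', 'by', 'says', 'over', 'us', 'can', 'what', 'why', 'about',
--   'where', 'around', 'up'
-- ])
--
-- def clean_sentences(sentences):
--   punctuation_sentences = [removal(sentence, punctuation) for sentence in sentences]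
--   lowercase_sentences = [sentence.lower() for sentence in punctuation_sentences]
--
--   split_sentences = [sentence.split() for sentence in lowercase_sentences]
--   processed_sentences = [" ".join(list(filter(lambda a: a not in stops, sentence))) for sentence in split_sentences]
--   unique_sentences = remove_duplicates(processed_sentences)
--
--   flattened_sentences = flatten_sentences(unique_sentences)
--   delimited_sentences = flattened_sentences.split(' ')[:-1]
--   return delimited_sentences
--
-- def removal(array, set):
--   local_array = array
--   for item in set:
--     local_array = local_array.replace(item, ' ')
--   return local_array
--
-- def flatten_sentences(sentences):
--   flattened = ''
--   for sentence in sentences: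
--     flattened = flattened + sentence + ' '
--   return flattened
--
-- def remove_duplicates(sentences):
--   unique_sentences = []
--   for sentence in sentences:
--     if sentence not in unique_sentences:
--       unique_sentences.append(sentence)
--   return unique_sentences
-- ===== SOURCE B (Python) =====
-- import string
--
-- _PUNCT = frozenset(string.punctuation)
--
-- _STOPS = frozenset([
--   'after','the', 'a', 'an', 'i', 'he', 'she', 'they', 'to', 'of', 'it', 'from', 's', 'is', 'in', 'on', 'with', 'for',
--   'how', 'as', 'at', 'be', 'have', 'has', 'had', 'and', 'are', 'by', 'says', 'over', 'us', 'can', 'what', 'why', 'about',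
--   'where', 'around', 'up'
-- ])
--
-- def _normalize(sentence):
--   # one character-level scan: punctuation and whitespace end the current word,
--   # other characters are lowercased and accumulated
--   words = []
--   buf = []
--   for ch in sentence:
--     if ch in _PUNCT or ch.isspace():
--       if buf:
--         word = ''.join(buf)
--         if word not in _STOPS:
--           words.append(word)
--         buf = []
--     else:
--       buf.append(ch.lower())
--   if buf:
--     word = ''.join(buf)
--     if word not in _STOPS:
--       words.append(word)
--   return ' '.join(words)
--
-- def clean_sentences(sentences):
--   keys = dict.fromkeys(_normalize(s) for s in sentences)
--   return [word for key in keys for word in key.split(' ')]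
-- ===== Notes on version B (the rewrite author's own statement) =====
-- stated objective: faster
-- what changed: B normalizes each sentence with a single character-level state machine (accumulate lowercased word buffers, flush at punctuation/whitespace, filtering stopwords at flush) instead of A's staged passes (32 successive str.replace, lower, split, filter, join), dedupes via dict.fromkeys instead of 'not in list' scans, and emits output by splitting each unique key once instead of flatten-join-then-resplit.
import Mathlib
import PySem

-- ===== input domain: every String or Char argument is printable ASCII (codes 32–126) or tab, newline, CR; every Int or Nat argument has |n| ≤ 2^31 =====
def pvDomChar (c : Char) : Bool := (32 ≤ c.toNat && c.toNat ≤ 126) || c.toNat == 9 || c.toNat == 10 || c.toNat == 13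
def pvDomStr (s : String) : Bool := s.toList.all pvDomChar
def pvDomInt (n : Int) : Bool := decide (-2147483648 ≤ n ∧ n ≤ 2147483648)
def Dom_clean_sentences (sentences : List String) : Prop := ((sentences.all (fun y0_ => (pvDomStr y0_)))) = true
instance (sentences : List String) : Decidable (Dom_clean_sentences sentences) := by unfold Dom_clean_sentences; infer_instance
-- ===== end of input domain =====

-- B replaces A's staged passes (32 str.replace, lower, split, filter, list-scan dedup,
-- flatten/re-split) by a single character-level state machine per sentence, dict-key dedup,
-- and a per-key split (faster).


-- shared module-level data: the stops set; A's list(string.punctuation), B's punctuation char set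
def pvStops : PySem.Set String := PySem.Set.ofList
  ["after","the", "a", "an", "i", "he", "she", "they", "to", "of", "it", "from", "s", "is", "in", "on", "with", "for",
   "how", "as", "at", "be", "have", "has", "had", "and", "are", "by", "says", "over", "us", "can", "what", "why", "about",
   "where", "around", "up"]

-- ===== PORT A =====
def pvPunct : List String := ["!", "\"", "#", "$", "%", "&", "'", "(", ")", "*", "+", ",", "-", ".", "/", ":", ";", "<", "=", ">", "?", "@", "[", "\\", "]", "^", "_", "`", "{", "|", "}", "~"]

def removal (array : String) (set : List String) : String :=
  set.foldl (fun local_array item => PySem.Str.replace local_array item " ") array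

def flatten_sentences (sentences : List String) : String :=
  -- 'flattened = flattened + sentence + " "': str concatenation ported exactly as append of code points
  sentences.foldl (fun flattened sentence => String.ofList (flattened.toList ++ sentence.toList ++ [' '])) ""

def remove_duplicates (sentences : List String) : List String :=
  sentences.foldl (fun unique sentence => if unique.contains sentence then unique else unique ++ [sentence]) []

def clean_sentences (sentences : List String) : List String :=
  let punctuation_sentences := sentences.map (fun sentence => removal sentence pvPunct)
  let lowercase_sentences := punctuation_sentences.map (fun sentence => PySem.Str.lower sentence)
  let split_sentences := lowercase_sentences.map (fun sentence => PySem.Str.split₀ sentence)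
  let processed_sentences := split_sentences.map (fun sentence => PySem.Str.join " " (sentence.filter (fun a => !(PySem.Set.contains pvStops a))))
  let unique_sentences := remove_duplicates processed_sentences
  let flattened_sentences := flatten_sentences unique_sentences
  PySem.List.slice ((PySem.Str.split? flattened_sentences " ").getD []) none (some (-1))

-- ===== PORT B =====
def pvPunctChars : List Char := "!\"#$%&'()*+,-./:;<=>?@[\\]^_`{|}~".toList

-- the body of _normalize's for-loop: state = (finished words, current word buffer)
def pvNormStep (st : List String × List Char) (ch : Char) : List String × List Char :=
  if pvPunctChars.contains ch || PySem.Chars.isspace ch then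
    if st.2.isEmpty then st
    else
      let word := String.ofList st.2
      ((if PySem.Set.contains pvStops word then st.1 else st.1 ++ [word]), [])
  else (st.1, st.2 ++ [PySem.Chars.lowerChar ch])

def pvNormalize (sentence : String) : String :=
  let st := sentence.toList.foldl pvNormStep ([], [])
  let words :=
    if st.2.isEmpty then st.1
    else
      let word := String.ofList st.2
      if PySem.Set.contains pvStops word then st.1 else st.1 ++ [word]
  PySem.Str.join " " words

def clean_sentences_alt (sentences : List String) : List String :=
  let keys := PySem.Set.ofList (sentences.map pvNormalize)   -- dict.fromkeys
  keys.flatMap (fun key => (PySem.Str.split? key " ").getD [])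

-- ===== PRECONDITION & SPEC =====
def Spec_clean_sentences (sentences : List String) (out : List String) : Prop := out = clean_sentences_alt sentences
instance (sentences : List String) (out : List String) : Decidable (Spec_clean_sentences sentences out) := by unfold Spec_clean_sentences; infer_instance

-- ===== CLAIM (what is proved, stated in full; the proofs are below) =====
def Claim_equal_clean_sentences : Prop := ∀ (sentences : List String), Dom_clean_sentences sentences → Spec_clean_sentences sentences (clean_sentences sentences)

-- ===== LEMMAS AND PROOFS =====

-- str.translate view of A's replace chain
def pvTranslate (s : String) : String :=
  String.ofList (s.toList.map (fun c => if pvPunctChars.contains c then ' ' else c))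

-- both sides' per-sentence normal form: the cleaned sentence string
def pvWordsB (sentence : String) : List String :=
  (PySem.Str.split₀ (PySem.Str.lower (pvTranslate sentence))).filter (fun w => !(PySem.Set.contains pvStops w))

def pvKey (s : String) : String := PySem.Str.join " " (pvWordsB s)

-- naive single-character split (reference model for s.split(' '))
def splitCh (c : Char) : List Char → List (List Char)
  | [] => [[]]
  | a :: t =>
      if a == c then [] :: splitCh c t
      else
        match splitCh c t with
        | [] => [[a]]
        | w :: ws => (a :: w) :: ws

def pvBlock (key : String) : List String := (splitCh ' ' key.toList).map String.ofList

theorem splitCh_ne_nil (c : Char) (l : List Char) : splitCh c l ≠ [] := by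
  induction l with
  | nil => simp [splitCh]
  | cons a t ih =>
    simp only [splitCh]
    split
    · simp
    · split <;> simp

theorem splitCh_append (c : Char) (x y : List Char) :
    splitCh c (x ++ c :: y) = splitCh c x ++ splitCh c y := by
  induction x with
  | nil => simp [splitCh]
  | cons a t ih =>
    simp only [List.cons_append, splitCh, ih]
    split
    · rfl
    · rcases h : splitCh c t with _ | ⟨w, ws⟩
      · exact absurd h (splitCh_ne_nil c t)
      · simp

theorem splitOn_go_eq (c : Char) (l : List Char) : ∀ (fuel : Nat) (cur : List Char) (acc : List (List Char)),
    l.length ≤ fuel →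
    PySem.Chars.splitOn.go [c] fuel l cur acc =
      acc.reverse ++ (match splitCh c l with
        | [] => [cur.reverse]
        | w :: ws => (cur.reverse ++ w) :: ws) := by
  induction l with
  | nil =>
    intro fuel cur acc _
    rw [PySem.Chars.splitOn.go.eq_def]
    rcases fuel with _ | fuel <;> simp [splitCh]
  | cons a t ih =>
    intro fuel cur acc hf
    rcases fuel with _ | fuel
    · simp at hf
    rw [PySem.Chars.splitOn.go.eq_def]
    simp only []
    have hpre : ([c].isPrefixOf (a :: t)) = (c == a) := by simp [List.isPrefixOf]
    by_cases hca : a = c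
    · subst hca
      rw [hpre]
      simp only [beq_self_eq_true, if_true]
      have hd : List.drop [a].length (a::t) = t := by simp
      rw [hd, ih fuel [] (cur.reverse :: acc) (by simpa using hf)]
      rcases h : splitCh a t with _ | ⟨w, ws⟩
      · exact absurd h (splitCh_ne_nil a t)
      · simp [splitCh, h]
    · rw [hpre]
      have : (c == a) = false := by simp [Ne.symm hca]
      rw [this]
      simp only [Bool.false_eq_true, if_false]
      rw [ih fuel (a :: cur) acc (by simpa using Nat.le_of_succ_le_succ hf)]
      rcases h : splitCh c t with _ | ⟨w, ws⟩
      · exact absurd h (splitCh_ne_nil c t)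
      · simp [splitCh, h, if_neg hca]

theorem splitOn_eq_splitCh (c : Char) (l : List Char) :
    PySem.Chars.splitOn l [c] = splitCh c l := by
  unfold PySem.Chars.splitOn
  rw [splitOn_go_eq c l (l.length + 1) [] [] (by omega)]
  rcases h : splitCh c l with _ | ⟨w, ws⟩
  · exact absurd h (splitCh_ne_nil c l)
  · simp

theorem replace_go_eq (c : Char) (l : List Char) : ∀ (fuel : Nat) (acc : List Char),
    l.length ≤ fuel →
    PySem.Chars.replace.go [c] [' '] fuel l acc =
      acc.reverse ++ l.map (fun a => if a == c then ' ' else a) := by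
  induction l with
  | nil =>
    intro fuel acc _
    rw [PySem.Chars.replace.go.eq_def]
    rcases fuel with _ | fuel <;> simp
  | cons a t ih =>
    intro fuel acc hf
    rcases fuel with _ | fuel
    · simp at hf
    rw [PySem.Chars.replace.go.eq_def]
    simp only []
    have hpre : ([c].isPrefixOf (a :: t)) = (c == a) := by simp [List.isPrefixOf]
    rw [hpre]
    by_cases hca : a = c
    · subst hca
      simp only [beq_self_eq_true, if_true]
      have hd : List.drop [a].length (a::t) = t := by simp
      rw [hd, ih fuel ([' '].reverse ++ acc) (by simpa using hf)]
      simp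
    · have : (c == a) = false := by simp [Ne.symm hca]
      rw [this]
      simp only [Bool.false_eq_true, if_false]
      rw [ih fuel (a :: acc) (by simpa using Nat.le_of_succ_le_succ hf)]
      simp [hca]

theorem replace_single (c : Char) (l : List Char) :
    PySem.Chars.replace l [c] [' '] = l.map (fun a => if a == c then ' ' else a) := by
  unfold PySem.Chars.replace
  rw [if_neg (by simp), replace_go_eq c l l.length [] (le_refl _)]
  simp

theorem removal_chain (cs : List Char) (hsp : ¬ ' ' ∈ cs) : ∀ (s : String),
    cs.foldl (fun acc c => PySem.Str.replace acc (String.ofList [c]) " ") s =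
      String.ofList (s.toList.map (fun a => if cs.contains a then ' ' else a)) := by
  induction cs with
  | nil => intro s; simp
  | cons c cs ih =>
    intro s
    simp only [List.mem_cons, not_or] at hsp
    simp only [List.foldl_cons]
    rw [ih hsp.2]
    congr 1
    have h1 : (PySem.Str.replace s (String.ofList [c]) " ").toList
        = s.toList.map (fun a => if a == c then ' ' else a) := by
      rw [PySem.Str.toList_replace]
      have : (" " : String).toList = [' '] := by decide
      rw [String.toList_ofList, this, replace_single]
    rw [h1, List.map_map]
    apply List.map_congr_left
    intro a _
    simp only [Function.comp]
    by_cases hac : a = c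
    · subst hac
      simp
    · have : (a == c) = false := by simp [hac]
      simp [this]
      simp [hac]

theorem removal_eq (s : String) : removal s pvPunct = pvTranslate s := by
  have hp : pvPunct = pvPunctChars.map (fun c => String.ofList [c]) := by decide
  unfold removal pvTranslate
  rw [hp, List.foldl_map]
  exact removal_chain pvPunctChars (by decide) s

theorem flatten_go (us : List String) : ∀ (acc : String),
    (us.foldl (fun flattened sentence => String.ofList (flattened.toList ++ sentence.toList ++ [' '])) acc).toList
      = acc.toList ++ us.flatMap (fun u => u.toList ++ [' ']) := by
  induction us with
  | nil => intro acc; simp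
  | cons u us ih =>
    intro acc
    rw [List.foldl_cons, ih]
    simp

theorem flatten_toList (us : List String) :
    (flatten_sentences us).toList = us.flatMap (fun u => u.toList ++ [' ']) := by
  have := flatten_go us ""
  simpa [flatten_sentences] using this

theorem splitCh_flatten (us : List String) :
    splitCh ' ' (us.flatMap (fun u => u.toList ++ [' '])) =
      us.flatMap (fun (u : String) => splitCh ' ' u.toList) ++ [[]] := by
  induction us with
  | nil => simp [splitCh]
  | cons u us ih =>
    simp only [List.flatMap_cons, List.append_assoc, List.singleton_append]
    rw [splitCh_append, ih]

theorem remove_duplicates_eq (xs : List String) : remove_duplicates xs = PySem.Set.ofList xs := by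
  rw [PySem.Set.ofList_eq_foldl]
  rfl

theorem A_char (sentences : List String) :
    clean_sentences sentences = (PySem.Set.ofList (sentences.map pvKey)).flatMap pvBlock := by
  unfold clean_sentences
  simp only [List.map_map]
  have hmap : sentences.map ((fun sentence => PySem.Str.join " " (sentence.filter (fun a => !(PySem.Set.contains pvStops a)))) ∘ (fun sentence => PySem.Str.split₀ sentence) ∘ (fun sentence => PySem.Str.lower sentence) ∘ (fun sentence => removal sentence pvPunct))
      = sentences.map pvKey := by
    apply List.map_congr_left
    intro s _
    simp only [Function.comp]
    rw [removal_eq]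
    rfl
  rw [hmap, remove_duplicates_eq]
  set us := PySem.Set.ofList (sentences.map pvKey) with hus
  have hsplit : PySem.Str.split? (flatten_sentences us) " "
      = some (((us.flatMap (fun (u : String) => splitCh ' ' u.toList)) ++ [[]]).map String.ofList) := by
    unfold PySem.Str.split? PySem.Chars.split?
    rw [show (" " : String).toList = [' '] from by decide]
    rw [if_neg (by simp)]
    rw [splitOn_eq_splitCh, flatten_toList, splitCh_flatten]
    rfl
  rw [hsplit]
  simp only [Option.getD_some]
  rw [PySem.List.slice_to_neg_one]
  rw [List.map_append]
  simp only [List.map_cons, List.map_nil]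
  rw [List.dropLast_concat]
  rw [List.map_flatMap]
  rfl

-- ===== B-side characterization: the state machine equals the staged pipeline =====

-- per-character effect of translate-then-lower
def pvTrlo (c : Char) : Char :=
  PySem.Chars.lowerChar (if pvPunctChars.contains c then ' ' else c)

theorem isupper_bounds (c : Char) (h : PySem.Chars.isupper c = true) :
    65 ≤ c.toNat ∧ c.toNat ≤ 90 := by
  unfold PySem.Chars.isupper at h
  simp only [Bool.and_eq_true, decide_eq_true_eq, Char.le_def] at h
  exact ⟨h.1, h.2⟩

theorem lowerChar_isspace (c : Char) :
    PySem.Chars.isspace (PySem.Chars.lowerChar c) = PySem.Chars.isspace c := by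
  unfold PySem.Chars.lowerChar
  by_cases h : PySem.Chars.isupper c = true
  · rw [if_pos h]
    obtain ⟨h1, h2⟩ := isupper_bounds c h
    have hn : (Char.ofNat (c.toNat + 32)).toNat = c.toNat + 32 := by
      rw [Char.toNat_ofNat, if_pos]; left; omega
    have hs1 : PySem.Chars.isspace c = false := by
      simp [PySem.Chars.isspace]; omega
    have hs2 : PySem.Chars.isspace (Char.ofNat (c.toNat + 32)) = false := by
      simp [PySem.Chars.isspace, hn]; omega
    rw [hs1, hs2]
  · rw [if_neg h]

theorem trlo_isspace (c : Char) :
    PySem.Chars.isspace (pvTrlo c) = (pvPunctChars.contains c || PySem.Chars.isspace c) := by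
  unfold pvTrlo
  by_cases hp : pvPunctChars.contains c = true
  · rw [if_pos hp, hp]
    simp [show PySem.Chars.isspace (PySem.Chars.lowerChar ' ') = true from by decide]
  · rw [if_neg hp, lowerChar_isspace,
      show pvPunctChars.contains c = false from by simpa using hp]
    simp

-- the stop-filtered view of a finished word list
def pvF (ws : List (List Char)) : List String :=
  (ws.map String.ofList).filter (fun w => !(PySem.Set.contains pvStops w))

-- the flush at the end of _normalize
def pvFinish (st : List String × List Char) : List String :=
  if st.2.isEmpty then st.1
  else
    let word := String.ofList st.2
    if PySem.Set.contains pvStops word then st.1 else st.1 ++ [word]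

theorem go_nil (cur : List Char) (acc : List (List Char)) :
    PySem.Chars.split₀.go [] cur acc
      = if cur.isEmpty then acc.reverse else (cur.reverse :: acc).reverse := rfl

theorem go_cons (c : Char) (rest cur : List Char) (acc : List (List Char)) :
    PySem.Chars.split₀.go (c :: rest) cur acc
      = if PySem.Chars.isspace c then
          (if cur.isEmpty then PySem.Chars.split₀.go rest [] acc
           else PySem.Chars.split₀.go rest [] (cur.reverse :: acc))
        else PySem.Chars.split₀.go rest (c :: cur) acc := rfl

theorem pvF_append (x y : List (List Char)) : pvF (x ++ y) = pvF x ++ pvF y := by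
  unfold pvF
  rw [List.map_append, List.filter_append]

theorem pvF_flush (acc : List (List Char)) (buf : List Char) :
    pvF (acc ++ [buf]) =
      (if PySem.Set.contains pvStops (String.ofList buf) then pvF acc else pvF acc ++ [String.ofList buf]) := by
  rw [pvF_append]
  unfold pvF
  simp only [List.map_cons, List.map_nil, List.filter]
  split_ifs with hstop <;> simp_all

theorem step_sep (ws : List String) (buf : List Char) (c : Char)
    (h : (pvPunctChars.contains c || PySem.Chars.isspace c) = true) :
    pvNormStep (ws, buf) c
      = if buf.isEmpty then (ws, buf)
        else ((if PySem.Set.contains pvStops (String.ofList buf) then ws else ws ++ [String.ofList buf]), []) := by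
  unfold pvNormStep
  rw [h]
  simp

theorem step_nonsep (ws : List String) (buf : List Char) (c : Char)
    (h : (pvPunctChars.contains c || PySem.Chars.isspace c) = false) :
    pvNormStep (ws, buf) c = (ws, buf ++ [PySem.Chars.lowerChar c]) := by
  unfold pvNormStep
  rw [h]
  simp

theorem machine_eq_go (l : List Char) : ∀ (buf : List Char) (acc : List (List Char)),
    pvFinish (l.foldl pvNormStep (pvF acc.reverse, buf)) =
      pvF (PySem.Chars.split₀.go (l.map pvTrlo) buf.reverse acc) := by
  induction l with
  | nil =>
    intro buf acc
    rw [List.map_nil, List.foldl_nil, go_nil]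
    by_cases hb : buf.isEmpty
    · have hbe : buf = [] := by simpa using hb
      subst hbe
      simp [pvFinish]
    · rw [if_neg (by simpa [List.isEmpty_iff] using hb)]
      unfold pvFinish
      rw [if_neg (by simpa using hb), List.reverse_reverse,
        show ((buf :: acc).reverse) = acc.reverse ++ [buf] from by simp, pvF_flush]
  | cons c rest ih =>
    intro buf acc
    simp only [List.foldl_cons, List.map_cons]
    rw [go_cons, trlo_isspace c]
    by_cases hsep : (pvPunctChars.contains c || PySem.Chars.isspace c) = true
    · rw [if_pos hsep, step_sep _ _ c hsep]
      by_cases hb : buf.isEmpty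
      · have hbe : buf = [] := by simpa using hb
        subst hbe
        rw [if_pos (by simp), if_pos (by simp)]
        exact ih [] acc
      · rw [if_neg hb,
          show (buf.reverse.isEmpty) = false from by simpa [List.isEmpty_iff] using hb]
        simp only [Bool.false_eq_true, if_false, List.reverse_reverse]
        have h2 := ih [] (buf :: acc)
        rw [List.reverse_nil] at h2
        rw [show (if PySem.Set.contains pvStops (String.ofList buf) then pvF acc.reverse
              else pvF acc.reverse ++ [String.ofList buf]) = pvF ((buf :: acc).reverse) from by
            rw [show ((buf :: acc).reverse) = acc.reverse ++ [buf] from by simp, pvF_flush]]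
        exact h2
    · have hfalse : (pvPunctChars.contains c || PySem.Chars.isspace c) = false :=
        Bool.eq_false_iff.mpr hsep
      rw [if_neg hsep, step_nonsep _ _ c hfalse]
      have hc : pvPunctChars.contains c = false := (Bool.or_eq_false_iff.mp hfalse).1
      have htr : pvTrlo c = PySem.Chars.lowerChar c := by
        unfold pvTrlo
        rw [hc]
        simp
      rw [htr]
      have h2 := ih (buf ++ [PySem.Chars.lowerChar c]) acc
      rw [List.reverse_append, List.reverse_singleton, List.singleton_append] at h2
      exact h2

theorem normalize_eq_key (s : String) : pvNormalize s = pvKey s := by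
  have hmach := machine_eq_go s.toList [] []
  have h0 : pvF (([] : List (List Char)).reverse) = [] := rfl
  rw [h0] at hmach
  have hlhs : pvNormalize s
      = PySem.Str.join " " (pvFinish (s.toList.foldl pvNormStep ([], []))) := rfl
  rw [hlhs, show (([] : List Char).reverse) = [] from rfl] at *
  rw [hmach]
  have hX : (PySem.Str.lower (pvTranslate s)).toList = s.toList.map pvTrlo := by
    rw [PySem.Str.toList_lower]
    unfold pvTranslate PySem.Chars.lower
    rw [String.toList_ofList, List.map_map]
    rfl
  have hsplit : PySem.Str.split₀ (PySem.Str.lower (pvTranslate s))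
      = (PySem.Chars.split₀ (s.toList.map pvTrlo)).map String.ofList := by
    rw [← hX, ← PySem.Str.split₀_map_toList, List.map_map]
    rw [show (String.ofList ∘ String.toList) = id from funext (fun x => by simp), List.map_id]
  unfold pvKey pvWordsB
  rw [hsplit]
  rfl

theorem block_eq_split (key : String) :
    (PySem.Str.split? key " ").getD [] = pvBlock key := by
  unfold pvBlock PySem.Str.split? PySem.Chars.split?
  rw [show (" " : String).toList = [' '] from by decide]
  rw [if_neg (by simp)]
  rw [splitOn_eq_splitCh]
  rfl

theorem B_char (sentences : List String) :
    clean_sentences_alt sentences = (PySem.Set.ofList (sentences.map pvKey)).flatMap pvBlock := by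
  unfold clean_sentences_alt
  rw [show sentences.map pvNormalize = sentences.map pvKey from
    List.map_congr_left (fun s _ => normalize_eq_key s)]
  exact List.flatMap_congr (fun key _ => block_eq_split key)

-- ===== VERDICT (by name: the statement is the Claim_ definition above) =====
theorem clean_sentences_spec : Claim_equal_clean_sentences := by
  intro sentences _
  unfold Spec_clean_sentences
  rw [A_char, B_char]
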